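-- pv_equiv track=rewrite | github.com/carlozen/accessControlVerification | main.py | ua_to_dict
-- ===== SOURCE A (Python) =====
-- def ua_to_dict(ua):
--     dict = {}
--     for item in ua:
--         item = item.replace("<", "").replace(">", "").split(",")
--         user = item[0]
--         role = item[1]
--         if user not in dict:
--             dict[user] = []
--         dict[user] += [role]
--     return dict
-- ===== SOURCE B (Python) =====
-- def ua_to_dict(ua):
--     parsed = [s.replace("<", "").replace(">", "").split(",") for s in ua]
--     return {p[0]: [q[1] for q in parsed if q[0] == p[0]] for p in parsed}
-- ===== Notes on version B (the rewrite author's own statement) =====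
-- stated objective: alternative
-- what changed: Replaces the single accumulating dict pass (conditional key init + append per item) with a parse-all-then-group-by pass: a flat parsed list is built once, then a dict comprehension maps each distinct user to a rescan-filter of the parsed list.
import Mathlib
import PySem

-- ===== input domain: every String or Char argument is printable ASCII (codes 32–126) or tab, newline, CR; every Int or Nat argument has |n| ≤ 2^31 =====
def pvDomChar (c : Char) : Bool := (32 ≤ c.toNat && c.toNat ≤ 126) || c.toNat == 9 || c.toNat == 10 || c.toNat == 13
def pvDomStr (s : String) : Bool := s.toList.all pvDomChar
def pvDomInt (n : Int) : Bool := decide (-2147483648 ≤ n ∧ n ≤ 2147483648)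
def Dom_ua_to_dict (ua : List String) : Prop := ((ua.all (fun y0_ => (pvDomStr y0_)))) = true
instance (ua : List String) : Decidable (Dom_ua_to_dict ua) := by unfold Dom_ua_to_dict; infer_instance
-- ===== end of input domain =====

-- B re-implements the accumulating dict loop as parse-all-then-group-by (a dict comprehension that
-- rescans the parsed list per distinct user); equivalence of the RETURN value is proved on Pre_.

-- shared parsing helper: item.replace("<","").replace(">","").split(",")  (both Pythons do exactly this)
def pvParse (s : String) : List String :=
  (PySem.Str.split? (PySem.Str.replace (PySem.Str.replace s "<" "") ">" "") ",").getD []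

-- item[0] / item[1]; the .getD "" default is unreachable under Pre_ (Python raises IndexError there)
def pvUser (p : List String) : String := (PySem.List.pyGet? p 0).getD ""
def pvRole (p : List String) : String := (PySem.List.pyGet? p 1).getD ""

-- ===== PORT A =====
def ua_to_dict (ua : List String) : List (String × List String) :=
  (ua.foldl (fun (d : PySem.Dict String (List String)) s =>
      let item := pvParse s
      let user := pvUser item
      let role := pvRole item
      let d := if d.contains user then d else d.insert user []
      d.insert user (d.getD user [] ++ [role])) PySem.Dict.empty).items

-- ===== PORT B =====
def ua_to_dict_alt (ua : List String) : List (String × List String) :=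
  let parsed := ua.map pvParse
  (parsed.foldl (fun (d : PySem.Dict String (List String)) p =>
      d.insert (pvUser p)
        ((parsed.filter (fun q => pvUser q == pvUser p)).map pvRole)) PySem.Dict.empty).items

-- ===== PRECONDITION & SPEC =====
-- Pre_ excludes exactly the inputs on which Python A raises IndexError (item[1]): an item whose
-- stripped string has fewer than two comma-separated fields.
def Pre_ua_to_dict (ua : List String) : Prop := ∀ s ∈ ua, 2 ≤ (pvParse s).length
instance (ua : List String) : Decidable (Pre_ua_to_dict ua) := by unfold Pre_ua_to_dict; infer_instance
def pvWitness_ua_to_dict : List String := ["<u1,admin>", "u2,guest", "<u1,dev>"]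

def Spec_ua_to_dict (ua : List String) (out : List (String × List String)) : Prop := out = ua_to_dict_alt ua
instance (ua : List String) (out : List (String × List String)) : Decidable (Spec_ua_to_dict ua out) := by unfold Spec_ua_to_dict; infer_instance

-- ===== CLAIM (what is proved, stated in full; the proofs are below) =====
def Claim_equal_ua_to_dict : Prop := ∀ (ua : List String), Dom_ua_to_dict ua → Pre_ua_to_dict ua → Spec_ua_to_dict ua (ua_to_dict ua)

-- ===== LEMMAS AND PROOFS =====

-- A's loop body is exactly Dict.modify with default []
lemma pv_stepA (d : PySem.Dict String (List String)) (u r : String) :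
    (let d' := if d.contains u then d else d.insert u []
     d'.insert u (d'.getD u [] ++ [r])) = d.modify u [] (· ++ [r]) := by
  by_cases h : d.contains u = true
  · simp only [h, if_pos]
    rfl
  · simp only [h, if_neg, Bool.not_eq_true]
    rw [show (d.modify u [] (· ++ [r])) = d.insert u (d.getD u [] ++ [r]) from rfl,
        PySem.Dict.getD_insert_self, PySem.Dict.insert_insert_self,
        PySem.Dict.getD_of_not_contains d [] (by simpa using h)]

lemma pv_modify_fold_items (ps : List (String × String)) :
    ((ps.foldl (fun (d : PySem.Dict String (List String)) p => d.modify p.1 [] (· ++ [p.2])) PySem.Dict.empty).items)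
    = (PySem.Set.ofList (ps.map Prod.fst)).map
        (fun u => (u, (ps.filter (fun p => p.1 == u)).map Prod.snd)) := by
  set D := ps.foldl (fun (d : PySem.Dict String (List String)) p => d.modify p.1 [] (· ++ [p.2])) PySem.Dict.empty with hD
  have hkeys : D.keys = PySem.Set.ofList (ps.map Prod.fst) := by
    rw [hD, PySem.Dict.keys_foldl_modify_key]
    simp [PySem.Set.update, PySem.Set.ofList, PySem.Dict.keys_empty]
  have hnd : D.keys.Nodup := by
    rw [hD]; exact PySem.Dict.nodup_keys_foldl_modify_key _ _ _ _ _ (by simp)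
  have hget : ∀ c, D.getD c [] = (ps.filter (fun p => p.1 == c)).map Prod.snd := by
    intro c
    rw [hD, PySem.Dict.getD_foldl_modify_append]
    simp [PySem.Dict.getD_empty]
  rw [PySem.Dict.items_eq_map_keys D hnd [], hkeys]
  exact List.map_congr_left (fun k _ => by rw [hget k])

-- a fold of inserts whose value depends only on the key
lemma pv_insert_fold_getD {α : Type} (key : α → String) (g : String → List String) :
    ∀ (l : List α) (d : PySem.Dict String (List String)) (c : String),
      (l.foldl (fun d p => d.insert (key p) (g (key p))) d).getD c []
      = if c ∈ l.map key then g c else d.getD c [] := by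
  intro l
  induction l with
  | nil => intro d c; simp
  | cons p l ih =>
    intro d c
    simp only [List.foldl_cons, List.map_cons, List.mem_cons]
    rw [ih]
    by_cases he : c = key p
    · subst he
      by_cases hm : key p ∈ l.map key
      · simp [hm]
      · simp [hm, PySem.Dict.getD_insert_self]
    · by_cases hm : c ∈ l.map key
      · simp [he, hm]
      · rw [if_neg hm, if_neg (by tauto), PySem.Dict.getD_insert, if_neg he]

lemma pv_insert_fold_items {α : Type} (key : α → String) (g : String → List String) (l : List α) :
    ((l.foldl (fun (d : PySem.Dict String (List String)) p => d.insert (key p) (g (key p))) PySem.Dict.empty).items)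
    = (PySem.Set.ofList (l.map key)).map (fun u => (u, g u)) := by
  set D := l.foldl (fun (d : PySem.Dict String (List String)) p => d.insert (key p) (g (key p))) PySem.Dict.empty with hD
  have hkeys : D.keys = PySem.Set.ofList (l.map key) := by
    rw [hD, PySem.Dict.keys_foldl_insert_key]
    simp [PySem.Set.update, PySem.Set.ofList, PySem.Dict.keys_empty]
  have hnd : D.keys.Nodup := by
    rw [hD]; exact PySem.Dict.nodup_keys_foldl_insert_key _ _ _ _ (by simp)
  rw [PySem.Dict.items_eq_map_keys D hnd [], hkeys]
  refine List.map_congr_left (fun k hk => ?_)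
  have hk' : k ∈ l.map key := by
    have := (PySem.Set.mem_ofList (l.map key) k).mp hk
    exact this
  rw [hD, pv_insert_fold_getD key g l PySem.Dict.empty k, if_pos hk']

lemma pv_A_canonical (ua : List String) :
    ua_to_dict ua
    = (PySem.Set.ofList (ua.map (fun s => pvUser (pvParse s)))).map
        (fun u => (u, ((ua.map (fun s => (pvUser (pvParse s), pvRole (pvParse s)))).filter
                        (fun p => p.1 == u)).map Prod.snd)) := by
  unfold ua_to_dict
  have hstep : (fun (d : PySem.Dict String (List String)) s =>
      let item := pvParse s
      let user := pvUser item
      let role := pvRole item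
      let d := if d.contains user then d else d.insert user []
      d.insert user (d.getD user [] ++ [role]))
      = fun d s => d.modify (pvUser (pvParse s)) [] (· ++ [pvRole (pvParse s)]) := by
    funext d s
    exact pv_stepA d (pvUser (pvParse s)) (pvRole (pvParse s))
  rw [hstep]
  have hfold : ua.foldl (fun (d : PySem.Dict String (List String)) s =>
        d.modify (pvUser (pvParse s)) [] (· ++ [pvRole (pvParse s)])) PySem.Dict.empty
      = (ua.map (fun s => (pvUser (pvParse s), pvRole (pvParse s)))).foldl
        (fun d p => d.modify p.1 [] (· ++ [p.2])) PySem.Dict.empty := by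
    rw [List.foldl_map]
  rw [hfold, pv_modify_fold_items, List.map_map]
  simp only [Function.comp_def]

lemma pv_B_canonical (ua : List String) :
    ua_to_dict_alt ua
    = (PySem.Set.ofList (ua.map (fun s => pvUser (pvParse s)))).map
        (fun u => (u, ((ua.map pvParse).filter (fun q => pvUser q == u)).map pvRole)) := by
  unfold ua_to_dict_alt
  rw [pv_insert_fold_items pvUser
      (fun u => ((ua.map pvParse).filter (fun q => pvUser q == u)).map pvRole) (ua.map pvParse)]
  rw [List.map_map]
  simp only [Function.comp_def]

-- ===== VERDICT (by name: the statement is the Claim_ definition above) =====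
theorem ua_to_dict_spec : Claim_equal_ua_to_dict := by
  intro ua _ _
  unfold Spec_ua_to_dict
  rw [pv_A_canonical, pv_B_canonical]
  refine List.map_congr_left (fun u _ => ?_)
  congr 1
  rw [show (fun s => (pvUser (pvParse s), pvRole (pvParse s)))
        = (fun q => (pvUser q, pvRole q)) ∘ pvParse from rfl,
      ← List.map_map, List.filter_map, List.map_map]
  rfl
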